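-- pv_equiv track=rewrite | github.com/GabJL/FP2021 | prácticas/práctica6/códigos/p6e14.distancia.py | distancia
-- ===== SOURCE A (Python) =====
-- def distancia(cadena, a):
--     primero = -1
--     último = -1
--     for i in range(len(cadena)):
--         if cadena[i] == a:
--             último = i
--             if primero == -1:
--                 primero = i
--     if primero == último:
--         dist = -1
--     else:
--         dist = último - primero
--     return dist
-- ===== SOURCE B (Python) =====
-- def distancia(cadena, a):
--     # forward scan: stop at the first occurrence
--     primero = -1
--     for i in range(len(cadena)):
--         if cadena[i] == a:
--             primero = i
--             break
--     if primero == -1: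
--         return -1
--     # backward scan: stop at the last occurrence
--     ultimo = -1
--     for i in range(len(cadena) - 1, -1, -1):
--         if cadena[i] == a:
--             ultimo = i
--             break
--     return -1 if ultimo == primero else ultimo - primero
-- ===== Notes on version B (the rewrite author's own statement) =====
-- stated objective: alternative
-- what changed: Replaces the single full pass that keeps both first- and last-occurrence state with two early-exit scans: a left-to-right scan for the first occurrence and a right-to-left scan for the last.
import Mathlib
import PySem

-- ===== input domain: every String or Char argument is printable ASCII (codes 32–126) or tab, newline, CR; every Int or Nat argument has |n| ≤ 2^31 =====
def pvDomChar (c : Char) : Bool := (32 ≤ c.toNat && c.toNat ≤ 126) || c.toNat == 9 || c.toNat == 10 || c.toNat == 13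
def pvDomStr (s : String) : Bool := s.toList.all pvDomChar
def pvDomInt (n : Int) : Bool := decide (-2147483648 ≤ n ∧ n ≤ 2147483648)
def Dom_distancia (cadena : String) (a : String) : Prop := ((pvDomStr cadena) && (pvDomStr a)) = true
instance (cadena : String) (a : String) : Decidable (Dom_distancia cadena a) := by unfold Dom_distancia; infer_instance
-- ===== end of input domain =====

-- B replaces A's single stateful pass by two early-exit scans (forward for the first
-- occurrence, backward for the last); same cost, different decomposition.

-- ===== PORT A =====
-- Python's `cadena[i] == a`: the one-character string at i compared with a
def chEq (a : String) (c : Char) : Bool := String.mk [c] == a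

-- A's loop: state (primero, último), index i ascending
def loopA (a : String) : List Char → Int → Int → Int → Int × Int
  | [], _, p, u => (p, u)
  | c :: cs, i, p, u =>
    if chEq a c then loopA a cs (i + 1) (if p = -1 then i else p) i
    else loopA a cs (i + 1) p u

def distancia (cadena : String) (a : String) : Int :=
  let r := loopA a cadena.toList 0 (-1) (-1)
  if r.1 = r.2 then -1 else r.2 - r.1

-- ===== PORT B =====
-- forward scan, early exit at the first match
def firstAux (a : String) : List Char → Int → Int
  | [], _ => -1
  | c :: cs, i => if chEq a c then i else firstAux a cs (i + 1)

-- backward scan (over the reversed list), early exit at the last match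
def lastAux (a : String) : List Char → Int → Int
  | [], _ => -1
  | c :: cs, i => if chEq a c then i else lastAux a cs (i - 1)

def distancia_alt (cadena : String) (a : String) : Int :=
  let p := firstAux a cadena.toList 0
  if p = -1 then -1
  else
    let u := lastAux a cadena.toList.reverse ((cadena.toList.length : Int) - 1)
    if u = p then -1 else u - p

-- ===== PRECONDITION & SPEC =====
def Spec_distancia (cadena : String) (a : String) (out : Int) : Prop := out = distancia_alt cadena a
instance (cadena : String) (a : String) (out : Int) : Decidable (Spec_distancia cadena a out) := by unfold Spec_distancia; infer_instance

-- ===== CLAIM (what is proved, stated in full; the proofs are below) =====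
def Claim_equal_distancia : Prop := ∀ (cadena : String) (a : String), Dom_distancia cadena a → Spec_distancia cadena a (distancia cadena a)

-- ===== LEMMAS AND PROOFS =====

-- forward pass that keeps the latest match (A's último-tracking, primero fixed)
def lastF (a : String) : List Char → Int → Int → Int
  | [], _, u => u
  | c :: cs, i, u => lastF a cs (i + 1) (if chEq a c then i else u)

theorem loopA_ne (a : String) (cs : List Char) :
    ∀ (i p u : Int), p ≠ -1 → loopA a cs i p u = (p, lastF a cs i u) := by
  induction cs with
  | nil => intro i p u _; simp [loopA, lastF]
  | cons c cs ih =>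
    intro i p u hp
    by_cases h : chEq a c
    · simp [loopA, lastF, h, hp, ih _ p i hp]
    · simp [loopA, lastF, h, ih _ p u hp]

theorem lastF_snoc (a : String) (cs : List Char) (c : Char) :
    ∀ (i u : Int), lastF a (cs ++ [c]) i u
      = if chEq a c then i + cs.length else lastF a cs i u := by
  induction cs with
  | nil => intro i u; by_cases h : chEq a c <;> simp [lastF, h]
  | cons d cs ih =>
    intro i u
    simp only [List.cons_append, lastF, ih, List.length_cons]
    by_cases h : chEq a c
    · rw [if_pos h, if_pos h]; push_cast; ring
    · rw [if_neg h, if_neg h]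

-- lastF = scan of the reversed list from the right end (when a match exists)
theorem lastF_eq_lastAux (a : String) (cs : List Char) :
    ∀ (i u : Int), lastF a cs i u
      = if cs.any (chEq a) then lastAux a cs.reverse (i + cs.length - 1) else u := by
  induction cs using List.reverseRecOn with
  | nil => intro i u; simp [lastF]
  | append_singleton cs c ih =>
    intro i u
    rw [lastF_snoc,
      show (cs ++ [c]).reverse = c :: cs.reverse by simp,
      show ((cs ++ [c]).length : Int) = (cs.length : Int) + 1 by simp]
    by_cases h : chEq a c
    · rw [if_pos h, if_pos (by simp [h])]
      simp only [lastAux, h, if_pos]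
      ring
    · rw [if_neg h, ih]
      have hidx : i + ((cs.length : Int) + 1) - 1 - 1 = i + (cs.length : Int) - 1 := by ring
      simp [lastAux, h, hidx]

theorem firstAux_eq_neg1 (a : String) (cs : List Char) :
    ∀ (i : Int), 0 ≤ i → (firstAux a cs i = -1 ↔ cs.any (chEq a) = false) := by
  induction cs with
  | nil => intro i _; simp [firstAux]
  | cons c cs ih =>
    intro i hi
    by_cases h : chEq a c
    · simp [firstAux, h]; omega
    · simp [firstAux, h, ih (i + 1) (by omega)]

-- main induction: A's fold from the empty state vs. B restated with lastF
theorem main_aux (a : String) (cs : List Char) :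
    ∀ (i : Int), 0 ≤ i →
      (let r := loopA a cs i (-1) (-1); if r.1 = r.2 then -1 else r.2 - r.1)
        = (let p := firstAux a cs i;
           if p = -1 then -1
           else let u := lastF a cs i (-1); if u = p then -1 else u - p) := by
  induction cs with
  | nil => intro i _; simp [loopA, firstAux]
  | cons c cs ih =>
    intro i hi
    by_cases h : chEq a c
    · have hne : (i : Int) ≠ -1 := by omega
      simp only [loopA, firstAux, lastF, h, if_pos, if_neg hne,
        loopA_ne a cs (i + 1) i i hne]
      simp [eq_comm]
    · simp only [loopA, firstAux, lastF, h]
      exact ih (i + 1) (by omega)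

-- ===== VERDICT (by name: the statement is the Claim_ definition above) =====
theorem distancia_spec : Claim_equal_distancia := by
  intro cadena a _
  show distancia cadena a = distancia_alt cadena a
  unfold distancia distancia_alt
  rw [main_aux a cadena.toList 0 le_rfl]
  by_cases hp : firstAux a cadena.toList 0 = -1
  · simp [hp]
  · have hany : cadena.toList.any (chEq a) = true := by
      by_contra h
      exact hp ((firstAux_eq_neg1 a cadena.toList 0 le_rfl).2 (by simpa using h))
    simp [hp, lastF_eq_lastAux, hany]
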